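-- pv_equiv track=rewrite | github.com/Heetk15/CNSESE | 3.mono.py | mono_decrypt
-- ===== SOURCE A (Python) =====
-- mono_key=list('qwertyuiopasdfghjklzxcvbnm')
--
-- def mono_decrypt(text):
--     result=""
--     for ch in text.lower():
--         if 'a' <= ch <='z':
--             idx=mono_key.index(ch)
--             result+=chr(idx+97)
--         else:
--             result+=ch
--     return result
-- ===== SOURCE B (Python) =====
-- # Staged passes over the alphabet: 26 global replaces with uppercase placeholders, then lower.
-- mono_key = list('qwertyuiopasdfghjklzxcvbnm')
--
-- def mono_decrypt(text):
--     s = text.lower()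
--     # the lowercased text contains no uppercase letters, so A..Z are safe placeholders
--     for i, k in enumerate(mono_key):
--         s = s.replace(k, chr(i + 65))
--     return s.lower()
-- ===== Notes on version B (the rewrite author's own statement) =====
-- stated objective: alternative
-- what changed: B iterates over the 26-letter key, not the text: it rewrites the lowercased text with one global replace per key letter to an uppercase placeholder and then lowercases once, instead of A's per-character scan with a conditional and a list.index lookup.
import Mathlib
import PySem

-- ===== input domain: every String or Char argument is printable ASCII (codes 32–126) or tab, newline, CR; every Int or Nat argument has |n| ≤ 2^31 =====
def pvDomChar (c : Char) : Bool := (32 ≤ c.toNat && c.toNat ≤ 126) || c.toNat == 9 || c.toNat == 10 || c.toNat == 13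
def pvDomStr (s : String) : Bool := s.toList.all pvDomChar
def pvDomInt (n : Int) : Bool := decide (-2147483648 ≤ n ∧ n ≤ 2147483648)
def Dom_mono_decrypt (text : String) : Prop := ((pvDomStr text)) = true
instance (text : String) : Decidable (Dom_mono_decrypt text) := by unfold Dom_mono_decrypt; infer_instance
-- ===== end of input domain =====

-- ===== PORT A =====
-- B rewrites the lowercased text with one global replace per key letter (uppercase placeholders) and lowercases once,
-- instead of A's per-character scan; return value only, no side effects.
def mono_key : List Char := "qwertyuiopasdfghjklzxcvbnm".toList

def mono_decrypt (text : String) : String :=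
  -- result=""; for ch in text.lower(): if 'a'<=ch<='z': result+=chr(mono_key.index(ch)+97) else: result+=ch
  -- mono_key contains every letter a..z, so .index never raises; its value is ported as (index? …).getD 0 (the default is never used).
  String.ofList ((PySem.Str.lower text).toList.foldl
    (fun result ch =>
      if 'a' ≤ ch ∧ ch ≤ 'z' then
        result ++ [Char.ofNat ((PySem.List.index? mono_key ch).getD 0 + 97)]
      else
        result ++ [ch]) [])

-- ===== PORT B =====
-- s = text.lower(); for i, k in enumerate(mono_key): s = s.replace(k, chr(i+65)); return s.lower()
def mono_decrypt_alt (text : String) : String :=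
  PySem.Str.lower ((PySem.List.enumerate mono_key 0).foldl
    (fun s p => PySem.Str.replace s (String.ofList [p.2]) (String.ofList [Char.ofNat (p.1.toNat + 65)]))
    (PySem.Str.lower text))

-- ===== PRECONDITION & SPEC =====
def Spec_mono_decrypt (text : String) (out : String) : Prop := out = mono_decrypt_alt text
instance (text : String) (out : String) : Decidable (Spec_mono_decrypt text out) := by unfold Spec_mono_decrypt; infer_instance

-- ===== CLAIM (what is proved, stated in full; the proofs are below) =====
def Claim_equal_mono_decrypt : Prop := ∀ (text : String), Dom_mono_decrypt text → Spec_mono_decrypt text (mono_decrypt text)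

-- ===== LEMMAS AND PROOFS =====
-- replace with a one-character pattern and replacement is a pointwise substitution
theorem pvGo_single (a b : Char) : ∀ (fuel : Nat) (l acc : List Char), l.length ≤ fuel →
    PySem.Chars.replace.go [a] [b] fuel l acc
      = acc.reverse ++ l.map (fun c => if c = a then b else c) := by
  intro fuel
  induction fuel with
  | zero =>
    intro l acc h
    have : l = [] := List.eq_nil_of_length_eq_zero (Nat.le_zero.mp h)
    subst this
    simp [PySem.Chars.replace.go]
  | succ f ih =>
    intro l acc h
    cases l with
    | nil => simp [PySem.Chars.replace.go]
    | cons c t =>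
      simp only [PySem.Chars.replace.go]
      by_cases hc : c = a
      · subst hc
        have hpre : List.isPrefixOf [c] (c :: t) = true := by
          simp [List.isPrefixOf]
        simp only [hpre, if_pos, List.length_cons, List.length_nil, Nat.zero_add,
          List.drop_succ_cons, List.drop_zero]
        have hb : [b].reverse ++ acc = b :: acc := by simp
        rw [hb, ih t (b :: acc) (Nat.le_of_succ_le_succ (by simpa using h))]
        simp
      · have hpre : List.isPrefixOf [a] (c :: t) = false := by
          simp [List.isPrefixOf]
          intro hac; exact absurd hac.symm hc
        simp only [hpre, Bool.false_eq_true, if_false]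
        rw [ih t (c :: acc) (Nat.le_of_succ_le_succ (by simpa using h))]
        simp [hc]

theorem pvReplace_single (a b : Char) (l : List Char) :
    PySem.Chars.replace l [a] [b] = l.map (fun c => if c = a then b else c) := by
  simp only [PySem.Chars.replace, List.isEmpty_cons, Bool.false_eq_true, if_false]
  simpa using pvGo_single a b l.length l [] (le_refl _)

-- a fold of pointwise-substituting passes is one pointwise pass
theorem pvFoldl_map_comp (ks : List (Int × Char)) :
    ∀ (init : List Char),
      ks.foldl (fun s p => s.map (fun c => if c = p.2 then Char.ofNat (p.1.toNat + 65) else c)) init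
        = init.map (fun c => ks.foldl (fun c p => if c = p.2 then Char.ofNat (p.1.toNat + 65) else c) c) := by
  induction ks with
  | nil => intro init; simp
  | cons k ks ih =>
    intro init
    simp only [List.foldl_cons]
    rw [ih, List.map_map]
    rfl

-- B's string fold, pushed down to lists of characters
theorem pvAltFold_toList (ks : List (Int × Char)) : ∀ (s : String),
    (ks.foldl (fun s p => PySem.Str.replace s (String.ofList [p.2])
        (String.ofList [Char.ofNat (p.1.toNat + 65)])) s).toList
      = ks.foldl (fun l p => l.map (fun c => if c = p.2 then Char.ofNat (p.1.toNat + 65) else c)) s.toList := by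
  induction ks with
  | nil => intro s; simp
  | cons k ks ih =>
    intro s
    simp only [List.foldl_cons]
    rw [ih]
    congr 1
    simp only [PySem.Str.replace]
    have h1 : (String.ofList [k.2]).toList = [k.2] := by simp
    have h2 : (String.ofList [Char.ofNat (k.1.toNat + 65)]).toList = [Char.ofNat (k.1.toNat + 65)] := by simp
    simp only [String.toList_ofList, h1, h2]
    exact pvReplace_single _ _ _

-- the two per-character functions agree on every 7-bit character
set_option maxRecDepth 100000 in
theorem pvChar_agree : ∀ n : Fin 128,
    (if 'a' ≤ PySem.Chars.lowerChar (Char.ofNat n.val) ∧ PySem.Chars.lowerChar (Char.ofNat n.val) ≤ 'z' then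
       Char.ofNat ((PySem.List.index? mono_key (PySem.Chars.lowerChar (Char.ofNat n.val))).getD 0 + 97)
     else PySem.Chars.lowerChar (Char.ofNat n.val))
    = PySem.Chars.lowerChar
        ((PySem.List.enumerate mono_key 0).foldl
          (fun c p => if c = p.2 then Char.ofNat (p.1.toNat + 65) else c)
          (PySem.Chars.lowerChar (Char.ofNat n.val))) := by decide

theorem pvChar_agree' (c : Char) (hc : c.toNat < 128) :
    (if 'a' ≤ PySem.Chars.lowerChar c ∧ PySem.Chars.lowerChar c ≤ 'z' then
       Char.ofNat ((PySem.List.index? mono_key (PySem.Chars.lowerChar c)).getD 0 + 97)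
     else PySem.Chars.lowerChar c)
    = PySem.Chars.lowerChar
        ((PySem.List.enumerate mono_key 0).foldl
          (fun c p => if c = p.2 then Char.ofNat (p.1.toNat + 65) else c)
          (PySem.Chars.lowerChar c)) := by
  have h := pvChar_agree ⟨c.toNat, hc⟩
  simpa [Char.ofNat_toNat] using h

-- ===== VERDICT (by name: the statement is the Claim_ definition above) =====
theorem mono_decrypt_spec : Claim_equal_mono_decrypt := by
  intro text hdom
  unfold Spec_mono_decrypt mono_decrypt mono_decrypt_alt
  -- A's accumulator loop is a map
  have hfoldA : ∀ (l : List Char) (acc : List Char),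
      l.foldl (fun result ch =>
        if 'a' ≤ ch ∧ ch ≤ 'z' then
          result ++ [Char.ofNat ((PySem.List.index? mono_key ch).getD 0 + 97)]
        else result ++ [ch]) acc
      = acc ++ l.map (fun ch =>
          if 'a' ≤ ch ∧ ch ≤ 'z' then
            Char.ofNat ((PySem.List.index? mono_key ch).getD 0 + 97)
          else ch) := by
    intro l acc
    have := PySem.List.foldl_append_singleton_eq_map
      (f := fun ch => if 'a' ≤ ch ∧ ch ≤ 'z' then
          Char.ofNat ((PySem.List.index? mono_key ch).getD 0 + 97) else ch)
      (l := l) (acc := acc)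
    rw [← this]
    congr 1
    funext r ch
    split <;> rfl
  rw [hfoldA]
  simp only [List.nil_append]
  -- both sides are String.ofList of character lists: compare their toList
  apply String.toList_inj.mp
  have hA : (PySem.Str.lower text).toList = text.toList.map PySem.Chars.lowerChar := by
    simp [PySem.Str.toList_lower, PySem.Chars.lower]
  rw [String.toList_ofList, hA, List.map_map]
  rw [PySem.Str.toList_lower, pvAltFold_toList, pvFoldl_map_comp,
    PySem.Chars.lower, List.map_map, hA, List.map_map]
  apply List.map_congr_left
  intro c hc
  have hdc : pvDomChar c = true := by
    have := (List.all_eq_true.mp hdom) c hc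
    simpa using this
  have hc128 : c.toNat < 128 := by
    simp only [pvDomChar, Bool.or_eq_true, Bool.and_eq_true, decide_eq_true_eq, beq_iff_eq] at hdc
    omega
  simpa using pvChar_agree' c hc128
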